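-- pv_equiv track=rewrite | github.com/isidman/gurukukomi | core/advanced_search.py | _generate_sources_section
-- ===== SOURCE A (Python) =====
-- from typing import List, Dict, Optional, Any
--
-- def _generate_sources_section(sources: List[Dict]) -> str:
--     """Generate sources section"""
--     if not sources:
--         return ""
--
--     sources_text = ["**Sources:**"]
--     unique_sources = {}
--
--     # Remove duplicates by URL
--     for source in sources:
--         url = source.get("url", "")
--         if url not in unique_sources:
--             unique_sources[url] = source
--
--     for i, (url, source) in enumerate(list(unique_sources.items())[:5], 1):
--         title = source.get("title", "Unknown")[:60]
--         sources_text.append(f"{i}. {title}\n   {url}")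
--
--     return "\n".join(sources_text)
-- ===== SOURCE B (Python) =====
-- def _generate_sources_section(sources):
--     """Generate sources section"""
--     if not sources:
--         return ""
--
--     def rec(k, seen, i):
--         # skip over sources whose url was already emitted
--         while k < len(sources) and sources[k].get("url", "") in seen:
--             k += 1
--         if i > 5 or k == len(sources):
--             return ""
--         source = sources[k]
--         url = source.get("url", "")
--         title = source.get("title", "Unknown")[:60]
--         return f"\n{i}. {title}\n   {url}" + rec(k + 1, seen | {url}, i + 1)
--
--     return "**Sources:**" + rec(0, set(), 1)
-- ===== Notes on version B (the rewrite author's own statement) =====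
-- stated objective: alternative
-- what changed: Replaces A's staged pipeline (build a full URL-keyed dedup dict over the whole list, slice its items to 5, enumerate, join) with a recursive decomposition: one recursive call per emitted line (depth at most 5) that index-scans past already-seen URLs and concatenates its formatted line directly onto the recursive result, never materialising a dict, a line list or a join.
import Mathlib
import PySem

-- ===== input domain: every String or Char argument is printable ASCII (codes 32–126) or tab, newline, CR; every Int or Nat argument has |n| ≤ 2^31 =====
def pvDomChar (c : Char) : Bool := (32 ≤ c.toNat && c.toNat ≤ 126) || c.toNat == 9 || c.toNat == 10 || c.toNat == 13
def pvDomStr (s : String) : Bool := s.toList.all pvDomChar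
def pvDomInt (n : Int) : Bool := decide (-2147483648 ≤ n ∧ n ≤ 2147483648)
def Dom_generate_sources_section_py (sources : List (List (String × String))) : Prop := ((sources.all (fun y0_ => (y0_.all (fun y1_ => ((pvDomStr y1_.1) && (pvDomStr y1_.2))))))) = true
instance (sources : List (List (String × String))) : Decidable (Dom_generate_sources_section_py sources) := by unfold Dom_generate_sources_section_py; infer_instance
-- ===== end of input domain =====

-- B change (objective: alternative): instead of A's dedup-dict → slice-to-5 → enumerate → join pipeline, B is a
-- recursive function (one call per emitted line, at most 5) that skips past already-seen URLs by index and
-- concatenates its formatted line directly onto the recursive result — no dict, no line list, no join.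

-- ===== PORT A =====
-- source.get(k, dflt) on the association-list dict
def pvGet (source : List (String × String)) (k dflt : String) : String :=
  (PySem.Dict.mk source).getD k dflt

-- one formatted line "f'{i}. {title}\n   {url}'" (title = source.get("title","Unknown")[:60])
def pvLine (p : Int × (String × List (String × String))) : String :=
  PySem.Int.toStr p.1 ++ ". " ++
    PySem.Str.slice (pvGet p.2.2 "title" "Unknown") none (some 60) ++ "\n   " ++ p.2.1

def pvStepA (d : PySem.Dict String (List (String × String))) (source : List (String × String)) :
    PySem.Dict String (List (String × String)) :=
  let url := pvGet source "url" ""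
  if d.contains url then d else d.insert url source

def generate_sources_section_py (sources : List (List (String × String))) : String :=
  if sources = [] then "" else
    let unique_sources := sources.foldl pvStepA PySem.Dict.empty
    let sources_text :=
      (PySem.List.enumerate (PySem.List.slice unique_sources.items none (some 5)) 1).foldl
        (fun acc p => acc ++ [pvLine p]) ["**Sources:**"]
    PySem.Str.join "\n" sources_text

-- ===== PORT B =====
-- the inner while loop: advance k past sources whose url is already in seen
def pvSkip (sources : List (List (String × String))) (seen : PySem.Set String) (k : Nat) : Nat :=
  if h : k < sources.length then
    if PySem.Set.contains seen (pvGet (sources.getD k []) "url" "") then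
      pvSkip sources seen (k + 1)
    else k
  else k
termination_by sources.length - k

-- rec(k, seen, i): skip seen urls, then either stop or emit one line and recurse
def pvRecB (sources : List (List (String × String))) (k : Nat) (seen : PySem.Set String)
    (i : Int) : String :=
  let k' := pvSkip sources seen k
  if 5 < i ∨ k' = sources.length then ""
  else
    let source := sources.getD k' []
    let url := pvGet source "url" ""
    let title := PySem.Str.slice (pvGet source "title" "Unknown") none (some 60)
    "\n" ++ PySem.Int.toStr i ++ ". " ++ title ++ "\n   " ++ url ++
      pvRecB sources (k' + 1) (PySem.Set.union seen (PySem.Set.ofList [url])) (i + 1)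
termination_by (6 - i).toNat
decreasing_by
  rename_i h
  rw [not_or] at h
  omega

def generate_sources_section_py_alt (sources : List (List (String × String))) : String :=
  if sources = [] then "" else
    "**Sources:**" ++ pvRecB sources 0 PySem.Set.empty 1

-- ===== PRECONDITION & SPEC =====
def Spec_generate_sources_section_py (sources : List (List (String × String))) (out : String) : Prop := out = generate_sources_section_py_alt sources
instance (sources : List (List (String × String))) (out : String) : Decidable (Spec_generate_sources_section_py sources out) := by unfold Spec_generate_sources_section_py; infer_instance

-- ===== CLAIM (what is proved, stated in full; the proofs are below) =====
def Claim_equal_generate_sources_section_py : Prop := ∀ (sources : List (List (String × String))), Dom_generate_sources_section_py sources → Spec_generate_sources_section_py sources (generate_sources_section_py sources)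

-- ===== LEMMAS AND PROOFS =====

-- proof-side restatement of pvRecB as structural recursion on the remaining suffix
def pvRecL : List (List (String × String)) → PySem.Set String → Int → String
  | [], _, _ => ""
  | s :: rest, seen, i =>
    if PySem.Set.contains seen (pvGet s "url" "") then pvRecL rest seen i
    else if 5 < i then ""
    else "\n" ++ PySem.Int.toStr i ++ ". " ++
        PySem.Str.slice (pvGet s "title" "Unknown") none (some 60) ++ "\n   " ++
        pvGet s "url" "" ++ pvRecL rest (PySem.Set.add seen (pvGet s "url" "")) (i + 1)

-- the tail of the output: one "\n"-prefixed line per enumerated pair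
def pvTailStr : List (Int × (String × List (String × String))) → String
  | [] => ""
  | p :: t => "\n" ++ pvLine p ++ pvTailStr t

lemma pvUnion_single (s : PySem.Set String) (x : String) :
    PySem.Set.union s (PySem.Set.ofList [x]) = PySem.Set.add s x := by
  simp [PySem.Set.union, PySem.Set.ofList, PySem.Set.update]

lemma pvRecB_eq_pvRecL (sources : List (List (String × String))) (k : Nat)
    (seen : PySem.Set String) (i : Int) (hk : k ≤ sources.length) :
    pvRecB sources k seen i = pvRecL (sources.drop k) seen i := by
  induction hn : sources.length - k generalizing k seen i with
  | zero =>
    have hkl : k = sources.length := by omega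
    rw [pvRecB, pvSkip]
    simp [hkl, List.drop_length, pvRecL]
  | succ n ih =>
    have hlt : k < sources.length := by omega
    rw [List.drop_eq_getElem_cons hlt]
    by_cases hm : pvGet sources[k] "url" "" ∈ seen
    · have hc : PySem.Set.contains seen (pvGet sources[k] "url" "") = true :=
        (PySem.Set.contains_iff _ _).2 hm
      have hskip : pvSkip sources seen k = pvSkip sources seen (k + 1) := by
        rw [pvSkip]
        simp [hlt, hm]
      have hB : pvRecB sources k seen i = pvRecB sources (k + 1) seen i := by
        rw [pvRecB, pvRecB, hskip]
      rw [hB, ih (k + 1) seen i (by omega) (by omega)]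
      simp [pvRecL, hm]
    · have hskip : pvSkip sources seen k = k := by
        rw [pvSkip]
        simp [hlt, hm]
      rw [pvRecB, hskip]
      by_cases hi : 5 < i
      · simp [hi, pvRecL, hm]
      · have hkl : ¬ (k = sources.length) := by omega
        rw [if_neg (by tauto)]
        simp only [List.getD_eq_getElem sources [] hlt, pvUnion_single,
          ih (k + 1) _ _ (by omega) (by omega)]
        simp [pvRecL, hm, hi]
-- A's dedup fold only ever appends to the items list
lemma pvFoldA_prefix (rest : List (List (String × String)))
    (d : PySem.Dict String (List (String × String))) :
    d.items <+: (rest.foldl pvStepA d).items := by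
  induction rest generalizing d with
  | nil => exact List.prefix_rfl
  | cons s t ih =>
    rw [List.foldl_cons]
    refine List.IsPrefix.trans ?_ (ih (pvStepA d s))
    show d.items <+:
      (if d.contains (pvGet s "url" "") = true then d else d.insert (pvGet s "url" "") s).items
    by_cases hc : d.contains (pvGet s "url" "") = true
    · simp [hc]
    · rw [if_neg hc, PySem.Dict.items_insert_of_not_contains _ _ (by simpa using hc)]
      exact List.prefix_append _ _

-- core invariant: the recursive emitter produces exactly the lines of A's first-5 dedup items
lemma pvRecL_eq (rest : List (List (String × String)))
    (d : PySem.Dict String (List (String × String))) (hnd : d.keys.Nodup) :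
    pvRecL rest d.keys ((d.items.length : Int) + 1)
      = pvTailStr (PySem.List.enumerate
          (((rest.foldl pvStepA d).items.take 5).drop d.items.length)
          ((d.items.length : Int) + 1)) := by
  induction rest generalizing d with
  | nil =>
    have hdrop : (d.items.take 5).drop d.items.length = [] :=
      List.drop_eq_nil_of_le (by simp)
    simp [pvRecL, hdrop, pvTailStr]
  | cons s t ih =>
    rw [List.foldl_cons]
    by_cases hm : pvGet s "url" "" ∈ d.keys
    · have hc : d.contains (pvGet s "url" "") = true :=
        (PySem.Dict.contains_iff_mem_keys _ _).2 hm
      have hstep : pvStepA d s = d := by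
        unfold pvStepA
        simp [hc]
      have hL : pvRecL (s :: t) d.keys ((d.items.length : Int) + 1)
          = pvRecL t d.keys ((d.items.length : Int) + 1) := by
        simp [pvRecL, hm]
      rw [hstep, hL, ih d hnd]
    · have hcnot : ¬ d.contains (pvGet s "url" "") = true :=
        fun hh => hm ((PySem.Dict.contains_iff_mem_keys _ _).1 hh)
      have hcf : d.contains (pvGet s "url" "") = false := by simpa using hcnot
      have hstep : pvStepA d s = d.insert (pvGet s "url" "") s := by
        unfold pvStepA
        simp [hcf]
      by_cases h5 : 5 < (d.items.length : Int) + 1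
      · have hB : pvRecL (s :: t) d.keys ((d.items.length : Int) + 1) = "" := by
          simp [pvRecL, hm, h5]
        have hdrop : (((t.foldl pvStepA (pvStepA d s)).items.take 5).drop d.items.length) = [] :=
          List.drop_eq_nil_of_le
            (by rw [List.length_take]; omega)
        rw [hB, hdrop]
        simp [pvTailStr]
      · have hn4 : d.items.length ≤ 4 := by omega
        rw [hstep]
        have hitems : (d.insert (pvGet s "url" "") s).items
            = d.items ++ [(pvGet s "url" "", s)] :=
          PySem.Dict.items_insert_of_not_contains _ _ hcf
        have hkeys : (d.insert (pvGet s "url" "") s).keys = d.keys ++ [pvGet s "url" ""] :=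
          PySem.Dict.keys_insert_of_not_contains _ _ hcf
        have hnd' : (d.insert (pvGet s "url" "") s).keys.Nodup := by
          rw [hkeys]
          refine List.Nodup.append hnd (List.nodup_singleton _) ?_
          intro a ha hb
          simp at hb
          subst hb
          exact hm ha
        have hlen' : (d.insert (pvGet s "url" "") s).items.length = d.items.length + 1 := by
          rw [hitems]
          simp
        have hIH := ih (d.insert (pvGet s "url" "") s) hnd'
        rw [hlen'] at hIH
        push_cast at hIH
        have hadd : PySem.Set.add d.keys (pvGet s "url" "")
            = (d.insert (pvGet s "url" "") s).keys := by
          rw [hkeys, PySem.Set.add_of_not_mem hm]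
        obtain ⟨u, hu⟩ := pvFoldA_prefix t (d.insert (pvGet s "url" "") s)
        have hF : (t.foldl pvStepA (d.insert (pvGet s "url" "") s)).items
            = d.items ++ ((pvGet s "url" "", s) :: u) := by
          rw [← hu, hitems]
          simp
        have htake : ((t.foldl pvStepA (d.insert (pvGet s "url" "") s)).items).take 5
            = d.items ++ ((pvGet s "url" "", s) :: u).take (5 - d.items.length) := by
          rw [hF, List.take_append, List.take_of_length_le (by omega)]
        have hdropn : (((t.foldl pvStepA (d.insert (pvGet s "url" "") s)).items).take 5).drop
              d.items.length
            = (pvGet s "url" "", s) :: u.take (4 - d.items.length) := by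
          rw [htake, List.drop_append_of_le_length (le_refl _), List.drop_length,
            List.nil_append, show 5 - d.items.length = (4 - d.items.length) + 1 from by omega,
            List.take_succ_cons]
        have hdropn1 : (((t.foldl pvStepA (d.insert (pvGet s "url" "") s)).items).take 5).drop
              (d.items.length + 1)
            = u.take (4 - d.items.length) := by
          rw [← List.drop_drop, hdropn, List.drop_one, List.tail_cons]
        rw [hdropn1] at hIH
        have hL : pvRecL (s :: t) d.keys ((d.items.length : Int) + 1)
            = "\n" ++ PySem.Int.toStr ((d.items.length : Int) + 1) ++ ". " ++
                PySem.Str.slice (pvGet s "title" "Unknown") none (some 60) ++ "\n   " ++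
                pvGet s "url" "" ++
                pvRecL t (PySem.Set.add d.keys (pvGet s "url" ""))
                  ((d.items.length : Int) + 1 + 1) := by
          simp [pvRecL, hm, h5]
        rw [hL, hadd, hIH, hdropn, PySem.List.enumerate_cons, pvTailStr]
        apply String.toList_inj.mp
        simp [pvLine, String.toList_append]
-- "\n".join(h :: lines) = h followed by the "\n"-prefixed lines
lemma pvJoin_eq (l : List (Int × (String × List (String × String)))) (h : String) :
    PySem.Str.join "\n" (h :: l.map pvLine) = h ++ pvTailStr l := by
  induction l generalizing h with
  | nil =>
    apply String.toList_inj.mp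
    simp [PySem.Str.toList_join, PySem.Chars.join_singleton, pvTailStr]
  | cons p t ih =>
    apply String.toList_inj.mp
    have : (PySem.Str.join "\n" (h :: (p :: t).map pvLine)).toList
        = h.toList ++ "\n".toList ++ (PySem.Str.join "\n" (pvLine p :: t.map pvLine)).toList := by
      simp [PySem.Str.toList_join, PySem.Chars.join_cons_cons]
    rw [this, ih (pvLine p)]
    simp [pvTailStr]
-- ===== VERDICT (by name: the statement is the Claim_ definition above) =====
theorem generate_sources_section_py_spec : Claim_equal_generate_sources_section_py := by
  intro sources _
  unfold Spec_generate_sources_section_py generate_sources_section_py generate_sources_section_py_alt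
  by_cases h : sources = []
  · simp [h]
  · rw [if_neg h, if_neg h]
    have hslice : PySem.List.slice ((sources.foldl pvStepA PySem.Dict.empty).items) none (some 5)
        = ((sources.foldl pvStepA PySem.Dict.empty).items).take 5 := by
      rw [show (some (5 : Int)) = some ((5 : Nat) : Int) by norm_num]
      exact PySem.List.slice_to_natCast _ 5
    have hrec : pvRecB sources 0 PySem.Set.empty 1
        = pvTailStr (PySem.List.enumerate
            (((sources.foldl pvStepA PySem.Dict.empty).items).take 5) 1) := by
      rw [pvRecB_eq_pvRecL sources 0 PySem.Set.empty 1 (Nat.zero_le _), List.drop_zero]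
      have := pvRecL_eq sources PySem.Dict.empty (by decide)
      simpa using this
    simp only [hslice, PySem.List.foldl_append_singleton_eq_map, List.singleton_append,
      pvJoin_eq, hrec]
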